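-- pv_equiv track=rewrite | github.com/GAIA-UNIL/G2S | build/qs_decentralized_slurm_client.py | parse_arg_entries
-- ===== SOURCE A (Python) =====
-- from typing import Any, Dict, List, Optional, Sequence, Tuple
--
-- def parse_arg_entries(argv: Sequence[str]) -> List[Tuple[str, List[str]]]:
--     entries: List[Tuple[str, List[str]]] = []
--     i = 1
--     while i < len(argv):
--         token = argv[i]
--         if not token.startswith("-"):
--             i += 1
--             continue
--         key = token
--         i += 1
--         values: List[str] = []
--         while i < len(argv) and not argv[i].startswith("-"):
--             values.append(argv[i])
--             i += 1
--         entries.append((key, values))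
--     return entries
-- ===== SOURCE B (Python) =====
-- def parse_arg_entries(argv):
--     entries = []
--     for token in list(argv)[1:]:
--         if token.startswith("-"):
--             entries.append((token, []))
--         elif entries:
--             entries[-1][1].append(token)
--     return entries
-- ===== Notes on version B (the rewrite author's own statement) =====
-- stated objective: simpler
-- what changed: Replaces A's nested index-driven while loops with a single for-loop state machine that starts a new entry on each flag and appends non-flag tokens to the last entry.
import Mathlib
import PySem

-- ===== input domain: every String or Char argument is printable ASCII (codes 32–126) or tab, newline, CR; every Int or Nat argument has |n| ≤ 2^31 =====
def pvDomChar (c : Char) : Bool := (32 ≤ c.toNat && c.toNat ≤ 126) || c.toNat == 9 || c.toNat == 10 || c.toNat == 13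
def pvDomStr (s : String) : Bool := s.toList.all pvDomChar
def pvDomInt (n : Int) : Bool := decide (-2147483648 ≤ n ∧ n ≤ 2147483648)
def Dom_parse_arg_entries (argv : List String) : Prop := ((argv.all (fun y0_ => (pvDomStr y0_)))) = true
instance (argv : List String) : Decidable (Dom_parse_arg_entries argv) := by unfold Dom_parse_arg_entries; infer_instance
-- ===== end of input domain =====

-- B replaces A's nested index-driven while loops by a single fold/state machine
-- (new entry on each flag, append to the last entry otherwise): simpler decomposition, same O(n) cost.


-- ===== PORT A =====
-- inner while loop of A: collect values until the next '-'-token; returns (values, rest of argv)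
def pvA_inner : List String → (List String × List String)
  | [] => ([], [])
  | t :: rest =>
    if PySem.Str.startswith t "-" then ([], t :: rest)
    else
      let r := pvA_inner rest
      (t :: r.1, r.2)

-- outer while loop of A; the Nat is fuel (= remaining length, a pure totality guard:
-- each step consumes at least one token, so the fuel never runs out)
def pvA_loop : Nat → List String → List (String × List String)
  | 0, _ => []
  | _, [] => []
  | f + 1, t :: rest =>
    if PySem.Str.startswith t "-" then
      (t, (pvA_inner rest).1) :: pvA_loop f (pvA_inner rest).2
    else
      pvA_loop f rest

def parse_arg_entries (argv : List String) : List (String × List String) :=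
  pvA_loop (argv.drop 1).length (argv.drop 1)    -- i starts at 1

-- ===== PORT B =====
-- one step of B's for-loop: a flag starts a fresh entry, other tokens join the last entry (if any)
def pvB_step (entries : List (String × List String)) (token : String) :
    List (String × List String) :=
  if PySem.Str.startswith token "-" then entries ++ [(token, [])]
  else
    match entries.getLast? with
    | none => entries
    | some (k, vs) => entries.dropLast ++ [(k, vs ++ [token])]

def parse_arg_entries_alt (argv : List String) : List (String × List String) :=
  (argv.drop 1).foldl pvB_step []

-- ===== PRECONDITION & SPEC =====
def Spec_parse_arg_entries (argv : List String) (out : List (String × List String)) : Prop := out = parse_arg_entries_alt argv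
instance (argv : List String) (out : List (String × List String)) : Decidable (Spec_parse_arg_entries argv out) := by unfold Spec_parse_arg_entries; infer_instance

-- ===== CLAIM (what is proved, stated in full; the proofs are below) =====
def Claim_equal_parse_arg_entries : Prop := ∀ (argv : List String), Dom_parse_arg_entries argv → Spec_parse_arg_entries argv (parse_arg_entries argv)

-- ===== LEMMAS AND PROOFS =====
-- invariant: with a nonempty accumulator ending in (k, vs), B's fold first extends vs with
-- A's inner-loop values, then continues as A's outer loop on the rest (any sufficient fuel)
theorem pvB_fold_concat : ∀ (l : List String) (f : Nat) (pre : List (String × List String))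
    (k : String) (vs : List String), l.length ≤ f →
    l.foldl pvB_step (pre ++ [(k, vs)]) =
      pre ++ (k, vs ++ (pvA_inner l).1) :: pvA_loop f (pvA_inner l).2
  | [], f, pre, k, vs, _ => by cases f <;> simp [pvA_inner, pvA_loop]
  | t :: rest, f, pre, k, vs, hf => by
    have hf1 : 1 ≤ f := le_trans (by simp) hf
    obtain ⟨g, rfl⟩ : ∃ g, f = g + 1 := ⟨f - 1, by omega⟩
    by_cases h : PySem.Chars.startswith t.toList ['-'] = true
    · have := pvB_fold_concat rest g (pre ++ [(k, vs)]) t [] (by simpa using Nat.lt_succ_iff.mp (by simpa using hf))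
      simp [pvB_step, pvA_inner, pvA_loop, h]
      simpa using this
    · have := pvB_fold_concat rest (g + 1) pre k (vs ++ [t]) (by simp at hf ⊢; omega)
      simp [pvB_step, pvA_inner, h, this]

theorem pvB_fold_nil : ∀ (l : List String) (f : Nat), l.length ≤ f →
    l.foldl pvB_step [] = pvA_loop f l
  | [], f, _ => by cases f <;> simp [pvA_loop]
  | t :: rest, f, hf => by
    have hf1 : 1 ≤ f := le_trans (by simp) hf
    obtain ⟨g, rfl⟩ : ∃ g, f = g + 1 := ⟨f - 1, by omega⟩
    by_cases h : PySem.Chars.startswith t.toList ['-'] = true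
    · have := pvB_fold_concat rest g ([] : List (String × List String)) t []
        (by simpa using Nat.lt_succ_iff.mp (by simpa using hf))
      simp only [List.nil_append] at this
      simp [pvB_step, pvA_loop, h, this]
    · have := pvB_fold_nil rest g (by simpa using Nat.lt_succ_iff.mp (by simpa using hf))
      simp [pvB_step, pvA_loop, h, this]

-- ===== VERDICT (by name: the statement is the Claim_ definition above) =====
theorem parse_arg_entries_spec : Claim_equal_parse_arg_entries := by
  intro argv _
  unfold Spec_parse_arg_entries parse_arg_entries parse_arg_entries_alt
  exact (pvB_fold_nil _ _ le_rfl).symm
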